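-- pv_equiv track=rewrite | github.com/sohee98/TIL-ssafy | 스터디/백준/1003_피보나치함수.py | fibonacci
-- ===== SOURCE A (Python) =====
-- def fibonacci(k, memo, count0, count1):
--     if memo[k]:
--         return memo[k], count0[k], count1[k]
--     if k == 0:
--         return 0, 1, 0
--     elif k == 1:
--         return 1, 0, 1
--     else:
--         m1, c01, c11 = fibonacci(k-1, memo, count0, count1)
--         m2, c02, c12 = fibonacci(k-2, memo, count0, count1)
--         memo[k], count0[k], count1[k] = m1+m2, c01+c02, c11+c12
--         return memo[k], count0[k], count1[k]
-- ===== SOURCE B (Python) =====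
-- def _val(i, memo, count0, count1):
--     # triple contributed by index i: cached entry if truthy (or already filled),
--     # otherwise the base-case literal for 0/1
--     if i == 0 and not memo[0]:
--         return 0, 1, 0
--     if i == 1 and not memo[1]:
--         return 1, 0, 1
--     return memo[i], count0[i], count1[i]
--
--
-- def fibonacci(k, memo, count0, count1):
--     if memo[k]:
--         return memo[k], count0[k], count1[k]
--     if k == 0:
--         return 0, 1, 0
--     if k == 1:
--         return 1, 0, 1
--     for j in range(2, k + 1):
--         if memo[j]:
--             continue
--         m1, a1, b1 = _val(j - 1, memo, count0, count1)
--         m2, a2, b2 = _val(j - 2, memo, count0, count1)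
--         memo[j], count0[j], count1[j] = m1 + m2, a1 + a2, b1 + b2
--     return memo[k], count0[k], count1[k]
-- ===== Notes on version B (the rewrite author's own statement) =====
-- stated objective: alternative
-- what changed: Replaces the memoized double recursion by a single bottom-up loop j=2..k that skips already-truthy cache entries and adds the two predecessor triples (reading the cache, with the 0/1 base literals only when those slots are not cached), so the recursion disappears entirely.
-- outside the precondition, e.g. on fibonacci(-1, [1, -1, 0], [0, -2, -1], [3, -3, -3, 0]): A returns (0, -2, -6), B returns (0, -1, 0)
import Mathlib
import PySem

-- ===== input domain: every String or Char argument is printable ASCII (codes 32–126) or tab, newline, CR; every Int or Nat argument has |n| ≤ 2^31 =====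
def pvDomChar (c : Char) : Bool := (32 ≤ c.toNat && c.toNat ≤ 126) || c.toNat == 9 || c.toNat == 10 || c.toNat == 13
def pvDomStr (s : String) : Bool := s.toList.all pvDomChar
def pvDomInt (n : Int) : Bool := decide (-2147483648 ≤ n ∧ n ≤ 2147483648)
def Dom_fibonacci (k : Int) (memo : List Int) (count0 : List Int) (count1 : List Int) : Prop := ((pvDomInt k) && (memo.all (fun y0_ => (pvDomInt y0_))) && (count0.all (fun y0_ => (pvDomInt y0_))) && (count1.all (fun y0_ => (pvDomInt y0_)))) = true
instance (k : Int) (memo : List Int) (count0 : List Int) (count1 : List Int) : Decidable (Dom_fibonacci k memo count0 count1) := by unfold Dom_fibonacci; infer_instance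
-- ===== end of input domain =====

-- B replaces A's memoized double recursion by one bottom-up loop over j = 2..k (objective: alternative,
-- no recursion).  Both versions mutate the three list arguments; the equivalence proved here is about
-- the RETURN value only (B may fill cache slots that A's recursion skips past when it hits a cached index).

-- ===== PORT A =====
-- A's recursion, threading the mutated lists as explicit state.  `memo[k]` etc. are ported with
-- PySem.List.pyGetD (Python indexing, wraparound for negative k; default 0 only out of range, which
-- Pre_ excludes).  For k < 0 with an uncached slot Python recurses without bound until IndexError
-- (outside Pre_); the `k < 0` branch is only a totality guard for that excluded region.  Writes use
-- k.toNat, exact since the write branch is only reachable (inside Pre_) for k ≥ 2.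
def fibAI (k : Int) (memo count0 count1 : List Int) :
    (Int × Int × Int) × (List Int × List Int × List Int) :=
  if PySem.List.pyGetD memo k 0 ≠ 0 then
    ((PySem.List.pyGetD memo k 0, PySem.List.pyGetD count0 k 0, PySem.List.pyGetD count1 k 0),
      (memo, count0, count1))
  else if k = 0 then ((0, 1, 0), (memo, count0, count1))
  else if k = 1 then ((1, 0, 1), (memo, count0, count1))
  else if k < 0 then ((0, 0, 0), (memo, count0, count1))  -- totality guard, outside Pre_
  else
    let r1 := fibAI (k - 1) memo count0 count1
    let r2 := fibAI (k - 2) r1.2.1 r1.2.2.1 r1.2.2.2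
    let memo' := r2.2.1.set k.toNat (r1.1.1 + r2.1.1)
    let count0' := r2.2.2.1.set k.toNat (r1.1.2.1 + r2.1.2.1)
    let count1' := r2.2.2.2.set k.toNat (r1.1.2.2 + r2.1.2.2)
    ((PySem.List.pyGetD memo' k 0, PySem.List.pyGetD count0' k 0, PySem.List.pyGetD count1' k 0),
      (memo', count0', count1'))
termination_by k.toNat
decreasing_by all_goals omega

def fibonacci (k : Int) (memo : List Int) (count0 : List Int) (count1 : List Int) : Int × Int × Int :=
  (fibAI k memo count0 count1).1

-- ===== PORT B =====
-- Source B's `_val`: the triple contributed by index i (base literal only for an uncached 0/1 slot).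
def pvVal (i : Nat) (memo count0 count1 : List Int) : Int × Int × Int :=
  if i = 0 ∧ memo.getD 0 0 = 0 then (0, 1, 0)
  else if i = 1 ∧ memo.getD 1 0 = 0 then (1, 0, 1)
  else (memo.getD i 0, count0.getD i 0, count1.getD i 0)

-- one iteration of Source B's `for j in range(2, k + 1)` body
def pvStep (s : List Int × List Int × List Int) (j : Nat) : List Int × List Int × List Int :=
  if s.1.getD j 0 ≠ 0 then s
  else
    let t1 := pvVal (j - 1) s.1 s.2.1 s.2.2
    let t2 := pvVal (j - 2) s.1 s.2.1 s.2.2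
    (s.1.set j (t1.1 + t2.1), s.2.1.set j (t1.2.1 + t2.2.1), s.2.2.set j (t1.2.2 + t2.2.2))

-- `range(2, k + 1)` is `List.range' 2 (k.toNat - 1)` (both empty for k < 2); boundary reads use pyGetD.
def fibonacci_alt (k : Int) (memo : List Int) (count0 : List Int) (count1 : List Int) : Int × Int × Int :=
  if PySem.List.pyGetD memo k 0 ≠ 0 then
    (PySem.List.pyGetD memo k 0, PySem.List.pyGetD count0 k 0, PySem.List.pyGetD count1 k 0)
  else if k = 0 then (0, 1, 0)
  else if k = 1 then (1, 0, 1)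
  else
    let s := (List.range' 2 (k.toNat - 1)).foldl pvStep (memo, count0, count1)
    (PySem.List.pyGetD s.1 k 0, PySem.List.pyGetD s.2.1 k 0, PySem.List.pyGetD s.2.2 k 0)

-- ===== PRECONDITION & SPEC =====
-- Pre_ excludes exactly the inputs where A raises IndexError (k ≥ len(memo), a count list too short
-- for an entry A must touch, or k < 0 with an uncached slot and no truthy entry ending the downward
-- wraparound recursion before it runs off the list) plus the k < 0 uncached inputs where that
-- accidental downward recursion does return a value, an artefact of negative-index wraparound that
-- the bottom-up loop has no reason to reproduce.  Negative k whose slot (and count slots) are cached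
-- in range are INSIDE Pre_: both programs just return the wrapped cached triple there.
def Pre_fibonacci (k : Int) (memo : List Int) (count0 : List Int) (count1 : List Int) : Prop :=
  (0 ≤ k ∧ k < (memo.length : Int) ∧
    ((k ≤ 1 ∧ memo.getD k.toNat 0 = 0) ∨ (k < (count0.length : Int) ∧ k < (count1.length : Int))))
  ∨ (k < 0 ∧ -(memo.length : Int) ≤ k ∧ PySem.List.pyGetD memo k 0 ≠ 0 ∧
      -(count0.length : Int) ≤ k ∧ -(count1.length : Int) ≤ k)
instance (k : Int) (memo : List Int) (count0 : List Int) (count1 : List Int) : Decidable (Pre_fibonacci k memo count0 count1) := by unfold Pre_fibonacci; infer_instance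

def pvWitness_fibonacci : Int × List Int × List Int × List Int := (4, [0, 0, 7, 0, 0], [0, 0, 9, 0, 0], [0, 0, 4, 0, 0])

def Spec_fibonacci (k : Int) (memo : List Int) (count0 : List Int) (count1 : List Int) (out : Int × Int × Int) : Prop := out = fibonacci_alt k memo count0 count1
instance (k : Int) (memo : List Int) (count0 : List Int) (count1 : List Int) (out : Int × Int × Int) : Decidable (Spec_fibonacci k memo count0 count1 out) := by unfold Spec_fibonacci; infer_instance

-- ===== CLAIM (what is proved, stated in full; the proofs are below) =====
def Claim_equal_fibonacci : Prop := ∀ (k : Int) (memo : List Int) (count0 : List Int) (count1 : List Int), Dom_fibonacci k memo count0 count1 → Pre_fibonacci k memo count0 count1 → Spec_fibonacci k memo count0 count1 (fibonacci k memo count0 count1)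

-- ===== LEMMAS AND PROOFS =====

-- proof-level restriction of fibAI to k ≥ 0, with plain Nat indexing (the bridge below equates them)
def fibA (n : Nat) (memo count0 count1 : List Int) :
    (Int × Int × Int) × (List Int × List Int × List Int) :=
  if memo.getD n 0 ≠ 0 then
    ((memo.getD n 0, count0.getD n 0, count1.getD n 0), (memo, count0, count1))
  else if _h0 : n = 0 then ((0, 1, 0), (memo, count0, count1))
  else if _h1 : n = 1 then ((1, 0, 1), (memo, count0, count1))
  else
    let r1 := fibA (n - 1) memo count0 count1
    let r2 := fibA (n - 2) r1.2.1 r1.2.2.1 r1.2.2.2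
    let memo' := r2.2.1.set n (r1.1.1 + r2.1.1)
    let count0' := r2.2.2.1.set n (r1.1.2.1 + r2.1.2.1)
    let count1' := r2.2.2.2.set n (r1.1.2.2 + r2.1.2.2)
    ((memo'.getD n 0, count0'.getD n 0, count1'.getD n 0), (memo', count0', count1'))
termination_by n
decreasing_by all_goals omega

lemma fibAI_eq_fibA : ∀ (N : Nat) (k : Int), 0 ≤ k → k.toNat = N → ∀ memo c0 c1 : List Int,
    fibAI k memo c0 c1 = fibA k.toNat memo c0 c1 := by
  intro N
  induction N using Nat.strong_induction_on with
  | _ N ih =>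
    intro k hk hN memo c0 c1
    have hm := fun (xs : List Int) => PySem.List.pyGetD_of_nonneg xs (0 : Int) hk
    rw [fibAI.eq_def, fibA.eq_def]
    simp only [hm]
    by_cases hg : memo.getD k.toNat 0 ≠ 0
    · rw [if_pos hg, if_pos hg]
    · rw [if_neg hg, if_neg hg]
      by_cases h0 : k = 0
      · rw [if_pos h0, dif_pos (by omega : k.toNat = 0)]
      · rw [if_neg h0, dif_neg (by omega : ¬ k.toNat = 0)]
        by_cases h1 : k = 1
        · rw [if_pos h1, dif_pos (by omega : k.toNat = 1)]
        · rw [if_neg h1, dif_neg (by omega : ¬ k.toNat = 1), if_neg (by omega : ¬ k < 0)]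
          rw [ih (k - 1).toNat (by omega) (k - 1) (by omega) rfl memo c0 c1,
            show (k - 1).toNat = k.toNat - 1 from by omega,
            ih (k - 2).toNat (by omega) (k - 2) (by omega) rfl _ _ _,
            show (k - 2).toNat = k.toNat - 2 from by omega]

-- the common mathematical value: what both programs return for index n, as a function of the ORIGINAL lists
def pvF (M C0 C1 : List Int) (n : Nat) : Int × Int × Int :=
  if M.getD n 0 ≠ 0 then (M.getD n 0, C0.getD n 0, C1.getD n 0)
  else if _h0 : n = 0 then (0, 1, 0)
  else if _h1 : n = 1 then (1, 0, 1)
  else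
    let a := pvF M C0 C1 (n - 1)
    let b := pvF M C0 C1 (n - 2)
    (a.1 + b.1, a.2.1 + b.2.1, a.2.2 + b.2.2)
termination_by n
decreasing_by all_goals omega

-- a state is consistent: every slot is either untouched or a filled (index ≥ 2, originally-0) slot holding pvF
def pvCons (M C0 C1 : List Int) (s : List Int × List Int × List Int) : Prop :=
  s.1.length = M.length ∧ s.2.1.length = C0.length ∧ s.2.2.length = C1.length ∧
  ∀ j : Nat,
    (s.1.getD j 0 = M.getD j 0 ∧ s.2.1.getD j 0 = C0.getD j 0 ∧ s.2.2.getD j 0 = C1.getD j 0)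
    ∨ (M.getD j 0 = 0 ∧ 2 ≤ j ∧ (s.1.getD j 0, s.2.1.getD j 0, s.2.2.getD j 0) = pvF M C0 C1 j)

lemma pvGetD_set_self (l : List Int) (n : Nat) (a : Int) (h : n < l.length) :
    (l.set n a).getD n 0 = a := by simp [List.getD, h]

lemma pvGetD_set_ne (l : List Int) (n j : Nat) (a : Int) (h : j ≠ n) :
    (l.set n a).getD j 0 = l.getD j 0 := by
  simp [List.getD, List.getElem?_set_ne (by omega : n ≠ j)]

lemma pvCons_init (M C0 C1 : List Int) : pvCons M C0 C1 (M, C0, C1) :=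
  ⟨rfl, rfl, rfl, fun _ => Or.inl ⟨rfl, rfl, rfl⟩⟩

lemma pvF_of_cons (M C0 C1 : List Int) (s : List Int × List Int × List Int)
    (hc : pvCons M C0 C1 s) (n : Nat) (hn : s.1.getD n 0 ≠ 0) :
    (s.1.getD n 0, s.2.1.getD n 0, s.2.2.getD n 0) = pvF M C0 C1 n := by
  rcases hc.2.2.2 n with ⟨h1, h2, h3⟩ | ⟨_, _, hF⟩
  · rw [h1] at hn ⊢
    rw [h2, h3, pvF.eq_def, if_pos hn]
  · exact hF

lemma fibA_correct (M C0 C1 : List Int) : ∀ (n : Nat) (s : List Int × List Int × List Int),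
    pvCons M C0 C1 s → n < M.length → n < C0.length → n < C1.length →
    (fibA n s.1 s.2.1 s.2.2).1 = pvF M C0 C1 n ∧ pvCons M C0 C1 (fibA n s.1 s.2.1 s.2.2).2 := by
  intro n
  induction n using Nat.strong_induction_on with
  | _ n ih =>
    intro s hc hM hC0 hC1
    obtain ⟨hl1, hl2, hl3, hall⟩ := hc
    rw [fibA.eq_def]
    by_cases hg : s.1.getD n 0 ≠ 0
    · rw [if_pos hg]
      exact ⟨pvF_of_cons M C0 C1 s ⟨hl1, hl2, hl3, hall⟩ n hg, hl1, hl2, hl3, hall⟩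
    · rw [if_neg hg]
      push_neg at hg
      have hMn : M.getD n 0 = 0 := by
        rcases hall n with ⟨h1, _, _⟩ | ⟨h1, _, _⟩
        · rw [← h1]; exact hg
        · exact h1
      by_cases h0 : n = 0
      · subst h0
        rw [dif_pos rfl]
        refine ⟨?_, hl1, hl2, hl3, hall⟩
        rw [pvF.eq_def, if_neg (by simpa [List.getD] using hMn), dif_pos rfl]
      · rw [dif_neg h0]
        by_cases h1 : n = 1
        · subst h1
          rw [dif_pos rfl]
          refine ⟨?_, hl1, hl2, hl3, hall⟩
          rw [pvF.eq_def, if_neg (by simpa [List.getD] using hMn), dif_neg (by omega : ¬(1 = 0)), dif_pos rfl]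
        · rw [dif_neg h1]
          have h2 : 2 ≤ n := by omega
          obtain ⟨e1, c1⟩ := ih (n - 1) (by omega) s ⟨hl1, hl2, hl3, hall⟩
            (by omega) (by omega) (by omega)
          obtain ⟨e2, c2⟩ := ih (n - 2) (by omega) (fibA (n - 1) s.1 s.2.1 s.2.2).2 c1
            (by omega) (by omega) (by omega)
          obtain ⟨m1, m2, m3, mall⟩ := c2
          dsimp only
          rw [e1, e2]
          have hv : pvF M C0 C1 n =
              ((pvF M C0 C1 (n - 1)).1 + (pvF M C0 C1 (n - 2)).1,
               (pvF M C0 C1 (n - 1)).2.1 + (pvF M C0 C1 (n - 2)).2.1,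
               (pvF M C0 C1 (n - 1)).2.2 + (pvF M C0 C1 (n - 2)).2.2) := by
            rw [pvF.eq_def, if_neg (by simpa [List.getD] using hMn), dif_neg h0, dif_neg h1]
          refine ⟨?_, ?_, ?_, ?_, ?_⟩
          · rw [pvGetD_set_self _ _ _ (by rw [m1]; omega),
              pvGetD_set_self _ _ _ (by rw [m2]; omega),
              pvGetD_set_self _ _ _ (by rw [m3]; omega), hv]
          · simpa using m1
          · simpa using m2
          · simpa using m3
          · intro j
            by_cases hj : j = n
            · subst hj
              refine Or.inr ⟨hMn, h2, ?_⟩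
              rw [pvGetD_set_self _ _ _ (by rw [m1]; omega),
                pvGetD_set_self _ _ _ (by rw [m2]; omega),
                pvGetD_set_self _ _ _ (by rw [m3]; omega), hv]
            · rw [pvGetD_set_ne _ _ _ _ hj, pvGetD_set_ne _ _ _ _ hj,
                pvGetD_set_ne _ _ _ _ hj]
              exact mall j

lemma pvVal_eq (M C0 C1 : List Int) (s : List Int × List Int × List Int)
    (hc : pvCons M C0 C1 s) (j : Nat)
    (hd : M.getD j 0 ≠ 0 ∨ j < 2 ∨ (s.1.getD j 0, s.2.1.getD j 0, s.2.2.getD j 0) = pvF M C0 C1 j) :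
    pvVal j s.1 s.2.1 s.2.2 = pvF M C0 C1 j := by
  obtain ⟨hl1, hl2, hl3, hall⟩ := hc
  unfold pvVal
  by_cases h0 : j = 0
  · subst h0
    rcases hall 0 with ⟨h1, h2, h3⟩ | ⟨_, habs, _⟩
    · by_cases hz : s.1.getD 0 0 = 0
      · have hM0 : M.getD 0 0 = 0 := by rw [← h1]; exact hz
        rw [if_pos ⟨rfl, hz⟩, pvF.eq_def,
          if_neg (by simpa [List.getD] using hM0), dif_pos rfl]
      · have hM0 : ¬ M.getD 0 0 = 0 := by rw [← h1]; exact hz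
        rw [if_neg (by simpa [List.getD] using hz), if_neg (by simp), h1, h2, h3,
          pvF.eq_def, if_pos hM0]
    · omega
  · rw [if_neg (by simp [h0])]
    by_cases h1 : j = 1
    · subst h1
      rcases hall 1 with ⟨h1, h2, h3⟩ | ⟨_, habs, _⟩
      · by_cases hz : s.1.getD 1 0 = 0
        · have hM0 : M.getD 1 0 = 0 := by rw [← h1]; exact hz
          rw [if_pos ⟨rfl, hz⟩, pvF.eq_def,
            if_neg (by simpa [List.getD] using hM0), dif_neg (by omega : ¬(1 = 0)), dif_pos rfl]
        · have hM0 : ¬ M.getD 1 0 = 0 := by rw [← h1]; exact hz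
          rw [if_neg (by simpa [List.getD] using hz), h1, h2, h3,
            pvF.eq_def, if_pos hM0]
      · omega
    · rw [if_neg (by simp [h1])]
      rcases hd with hM | hj | hF
      · exact pvF_of_cons M C0 C1 s ⟨hl1, hl2, hl3, hall⟩ j (by
          rcases hall j with ⟨e1, _, _⟩ | ⟨e1, _, _⟩
          · rw [e1]; exact hM
          · exact absurd e1 hM)
      · omega
      · exact hF

def pvDone (M C0 C1 : List Int) (s : List Int × List Int × List Int) (n : Nat) : Prop :=
  ∀ j : Nat, 2 ≤ j → j ≤ n →
    M.getD j 0 ≠ 0 ∨ (s.1.getD j 0, s.2.1.getD j 0, s.2.2.getD j 0) = pvF M C0 C1 j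

lemma loop_inv (M C0 C1 : List Int) : ∀ (c : Nat), c + 1 < M.length → c + 1 < C0.length → c + 1 < C1.length →
    pvCons M C0 C1 ((List.range' 2 c).foldl pvStep (M, C0, C1)) ∧
    pvDone M C0 C1 ((List.range' 2 c).foldl pvStep (M, C0, C1)) (c + 1) := by
  intro c
  induction c with
  | zero =>
    intro _ _ _
    exact ⟨pvCons_init M C0 C1, fun j hj hj' => by omega⟩
  | succ c ih =>
    intro hM hC0 hC1
    obtain ⟨hcons, hdone⟩ := ih (by omega) (by omega) (by omega)
    have hrange : List.range' 2 (c + 1) = List.range' 2 c ++ [2 + c] := by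
      simpa using List.range'_concat (s := 2) (n := c) (step := 1)
    rw [hrange, List.foldl_append]
    set s := (List.range' 2 c).foldl pvStep (M, C0, C1) with hs
    obtain ⟨hl1, hl2, hl3, hall⟩ := hcons
    simp only [List.foldl_cons, List.foldl_nil]
    unfold pvStep
    by_cases hg : s.1.getD (2 + c) 0 ≠ 0
    · rw [if_pos hg]
      refine ⟨⟨hl1, hl2, hl3, hall⟩, ?_⟩
      intro j hj hj'
      by_cases hjc : j = 2 + c
      · subst hjc
        exact Or.inr (pvF_of_cons M C0 C1 s ⟨hl1, hl2, hl3, hall⟩ _ hg)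
      · exact hdone j hj (by omega)
    · rw [if_neg hg]
      push_neg at hg
      have hMn : M.getD (2 + c) 0 = 0 := by
        rcases hall (2 + c) with ⟨h1, _, _⟩ | ⟨h1, _, _⟩
        · rw [← h1]; exact hg
        · exact h1
      have ht1 : pvVal (2 + c - 1) s.1 s.2.1 s.2.2 = pvF M C0 C1 (c + 1) := by
        have := pvVal_eq M C0 C1 s ⟨hl1, hl2, hl3, hall⟩ (c + 1) (by
          by_cases hc1 : c = 0
          · subst hc1; exact Or.inr (Or.inl (by omega))
          · rcases hdone (c + 1) (by omega) (by omega) with h | h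
            · exact Or.inl h
            · exact Or.inr (Or.inr h))
        simpa [show 2 + c - 1 = c + 1 by omega] using this
      have ht2 : pvVal (2 + c - 2) s.1 s.2.1 s.2.2 = pvF M C0 C1 c := by
        have := pvVal_eq M C0 C1 s ⟨hl1, hl2, hl3, hall⟩ c (by
          by_cases hc1 : c ≤ 1
          · exact Or.inr (Or.inl (by omega))
          · rcases hdone c (by omega) (by omega) with h | h
            · exact Or.inl h
            · exact Or.inr (Or.inr h))
        simpa [show 2 + c - 2 = c by omega] using this
      dsimp only
      rw [ht1, ht2]
      have hv : pvF M C0 C1 (2 + c) =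
          ((pvF M C0 C1 (c + 1)).1 + (pvF M C0 C1 c).1,
           (pvF M C0 C1 (c + 1)).2.1 + (pvF M C0 C1 c).2.1,
           (pvF M C0 C1 (c + 1)).2.2 + (pvF M C0 C1 c).2.2) := by
        rw [pvF.eq_def, if_neg (by simpa [List.getD] using hMn), dif_neg (by omega : ¬(2 + c = 0)),
          dif_neg (by omega : ¬(2 + c = 1))]
        simp only [show 2 + c - 1 = c + 1 from by omega, show 2 + c - 2 = c from by omega]
      constructor
      · refine ⟨by simpa using hl1, by simpa using hl2, by simpa using hl3, ?_⟩
        intro j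
        by_cases hj : j = 2 + c
        · subst hj
          refine Or.inr ⟨hMn, by omega, ?_⟩
          rw [pvGetD_set_self _ _ _ (by rw [hl1]; omega),
            pvGetD_set_self _ _ _ (by rw [hl2]; omega),
            pvGetD_set_self _ _ _ (by rw [hl3]; omega), hv]
        · rw [pvGetD_set_ne _ _ _ _ hj, pvGetD_set_ne _ _ _ _ hj,
            pvGetD_set_ne _ _ _ _ hj]
          exact hall j
      · intro j hj hj'
        by_cases hjc : j = 2 + c
        · subst hjc
          refine Or.inr ?_
          rw [pvGetD_set_self _ _ _ (by rw [hl1]; omega),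
            pvGetD_set_self _ _ _ (by rw [hl2]; omega),
            pvGetD_set_self _ _ _ (by rw [hl3]; omega), hv]
        · rw [pvGetD_set_ne _ _ _ _ hjc, pvGetD_set_ne _ _ _ _ hjc,
            pvGetD_set_ne _ _ _ _ hjc]
          exact hdone j hj (by omega)

lemma fibonacci_eq_pvF (k : Int) (memo count0 count1 : List Int)
    (hk0 : 0 ≤ k) (hkM : k < (memo.length : Int))
    (hrest : (k ≤ 1 ∧ memo.getD k.toNat 0 = 0) ∨
      (k < (count0.length : Int) ∧ k < (count1.length : Int))) :
    fibonacci k memo count0 count1 = pvF memo count0 count1 k.toNat := by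
  unfold fibonacci
  rw [fibAI_eq_fibA k.toNat k hk0 rfl]
  by_cases hk1 : k ≤ 1
  · rw [fibA.eq_def]
    by_cases hg : memo.getD k.toNat 0 ≠ 0
    · rw [if_pos hg, pvF.eq_def, if_pos hg]
    · rw [if_neg hg]
      push_neg at hg
      by_cases h0 : k.toNat = 0
      · rw [dif_pos h0, h0, pvF.eq_def, if_neg (by simpa [List.getD] using h0 ▸ hg), dif_pos rfl]
      · have h1 : k.toNat = 1 := by omega
        rw [dif_neg h0, dif_pos h1, h1, pvF.eq_def, if_neg (by simpa [List.getD] using h1 ▸ hg),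
          dif_neg (by omega : ¬(1 = 0)), dif_pos rfl]
  · have hcnt : k < (count0.length : Int) ∧ k < (count1.length : Int) := by
      rcases hrest with ⟨h, _⟩ | h
      · omega
      · exact h
    exact (fibA_correct memo count0 count1 k.toNat (memo, count0, count1)
      (pvCons_init memo count0 count1) (by omega) (by omega) (by omega)).1

lemma fibonacci_alt_eq_pvF (k : Int) (memo count0 count1 : List Int)
    (hk0 : 0 ≤ k) (hkM : k < (memo.length : Int))
    (hrest : (k ≤ 1 ∧ memo.getD k.toNat 0 = 0) ∨
      (k < (count0.length : Int) ∧ k < (count1.length : Int))) :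
    fibonacci_alt k memo count0 count1 = pvF memo count0 count1 k.toNat := by
  unfold fibonacci_alt
  have hm := fun (xs : List Int) => PySem.List.pyGetD_of_nonneg xs (0 : Int) hk0
  simp only [hm]
  by_cases hg : memo.getD k.toNat 0 ≠ 0
  · rw [if_pos hg, pvF.eq_def, if_pos hg]
  · rw [if_neg hg]
    push_neg at hg
    by_cases h0 : k = 0
    · have h0' : k.toNat = 0 := by omega
      rw [if_pos h0, h0', pvF.eq_def, if_neg (by simpa [List.getD] using h0' ▸ hg), dif_pos rfl]
    · rw [if_neg h0]
      by_cases h1 : k = 1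
      · have h1' : k.toNat = 1 := by omega
        rw [if_pos h1, h1', pvF.eq_def, if_neg (by simpa [List.getD] using h1' ▸ hg),
          dif_neg (by omega : ¬(1 = 0)), dif_pos rfl]
      · rw [if_neg h1]
        have hk2 : 2 ≤ k.toNat := by omega
        have hcnt : k < (count0.length : Int) ∧ k < (count1.length : Int) := by
          rcases hrest with ⟨h, _⟩ | h
          · omega
          · exact h
        obtain ⟨hcons, hdone⟩ := loop_inv memo count0 count1 (k.toNat - 1)
          (by omega) (by omega) (by omega)
        have heq : k.toNat - 1 + 1 = k.toNat := by omega
        rw [heq] at hdone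
        rcases hdone k.toNat hk2 (le_refl _) with h | h
        · exact absurd hg h
        · exact h

-- ===== VERDICT (by name: the statement is the Claim_ definition above) =====
theorem fibonacci_spec : Claim_equal_fibonacci := by
  intro k memo count0 count1 _ hp
  unfold Spec_fibonacci
  rcases hp with ⟨hk0, hkM, hrest⟩ | ⟨hneg, hlo, hg, hc0, hc1⟩
  · rw [fibonacci_eq_pvF k memo count0 count1 hk0 hkM hrest,
      fibonacci_alt_eq_pvF k memo count0 count1 hk0 hkM hrest]
  · unfold fibonacci fibonacci_alt
    rw [fibAI.eq_def, if_pos hg, if_pos hg]
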